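-- pv_equiv track=rewrite | github.com/mikecafarella/KNP | service/server.py | createDocumentDocumentList
-- ===== SOURCE A (Python) =====
-- def createDocumentDocumentList(shingle_pairs):
--     current_shingle = ""
--     low_index = -1
--     document_document_shingle = []
--     for k in range(0, len (shingle_pairs)):
--         if shingle_pairs[k][0] != current_shingle:
--             current_shingle = shingle_pairs[k][0]
--             low_index = k
--         else:
--             for i in range(low_index, k):
--                 if shingle_pairs[i][2] or shingle_pairs[k][2]:
--                     document_document_shingle.append((shingle_pairs[i][1], shingle_pairs[k][1], current_shingle))
--
--     document_document_shingle.sort()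
--     return document_document_shingle
-- ===== SOURCE B (Python) =====
-- def createDocumentDocumentList(shingle_pairs):
--     # Group consecutive equal shingles; pair each element only against the
--     # partners that can actually produce output (all previous run members if
--     # this one is flagged, otherwise only the flagged previous members).
--     out = []
--     current = None
--     run_docs = []      # doc ids of the current run, in order
--     flagged_docs = []  # doc ids of flagged members of the current run, in order
--     for shingle, doc, flagged in shingle_pairs:
--         if shingle != current:
--             current = shingle
--             run_docs = []
--             flagged_docs = []
--         else:
--             partners = run_docs if flagged else flagged_docs
--             out.extend((p, doc, shingle) for p in partners)
--         run_docs.append(doc)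
--         if flagged:
--             flagged_docs.append(doc)
--     out.sort()
--     return out
-- ===== Notes on version B (the rewrite author's own statement) =====
-- stated objective: alternative
-- what changed: B makes one grouped pass keeping per-run partner lists (all doc ids / flagged doc ids) and emits each element's pairs from those lists, instead of A's index bookkeeping with a remembered low index and an inner rescan of shingle_pairs[low:k]; B also starts the first run properly instead of A's low_index=-1 wraparound.
-- intended difference: On inputs whose first element's shingle equals A's sentinel "" and where the last element or some element of that leading run is flagged, A's low_index stays -1 so negative indexing pairs the leading run against the list's last element and A returns those spurious pairs; B treats the leading run as an ordinary run and returns only within-run pairs, which is the intended grouping behaviour. — e.g. on createDocumentDocumentList([("", 5, true)]): A returns [(5, 5, "")], B returns []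
import Mathlib
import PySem

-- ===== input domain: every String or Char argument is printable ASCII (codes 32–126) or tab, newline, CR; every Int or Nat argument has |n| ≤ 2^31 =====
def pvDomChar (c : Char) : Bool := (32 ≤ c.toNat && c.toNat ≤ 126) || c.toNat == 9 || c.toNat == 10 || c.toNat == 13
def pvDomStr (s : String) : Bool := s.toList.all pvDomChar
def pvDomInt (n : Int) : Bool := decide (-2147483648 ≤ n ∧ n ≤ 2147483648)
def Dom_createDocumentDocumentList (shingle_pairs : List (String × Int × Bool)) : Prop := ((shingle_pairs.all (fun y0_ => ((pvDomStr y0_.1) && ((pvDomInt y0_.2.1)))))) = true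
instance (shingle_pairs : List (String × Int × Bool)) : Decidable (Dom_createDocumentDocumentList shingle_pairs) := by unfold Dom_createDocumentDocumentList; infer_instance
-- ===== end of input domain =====

-- B re-implements A's shingle-group pairing with per-run partner lists instead of A's
-- low-index rescans, and without A's leading-run low_index=-1 wraparound; equivalence outside D_.

-- shared sort helper: Python's list.sort() on (int, int, str) triples —
-- stable insertion sort (PySem.List.insertBy) under Python's lexicographic tuple order;
-- String '<' is Python-exact (PYSEM.md: str comparison is code-point lexicographic).
def pvTripleLt (a b : Int × Int × String) : Bool :=
  a.1 < b.1 || (a.1 == b.1 && (a.2.1 < b.2.1 || (a.2.1 == b.2.1 && decide (a.2.2 < b.2.2))))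

def pvSortTriples (xs : List (Int × Int × String)) : List (Int × Int × String) :=
  xs.foldl (fun acc x => PySem.List.insertBy pvTripleLt x acc) []

-- ===== PORT A =====
-- inner loop: for i in range(low_index, k): if shingle_pairs[i][2] or shingle_pairs[k][2]: append
def stepInnerA (sp : List (String × Int × Bool)) (pk : String × Int × Bool) (cur : String)
    (acc2 : List (Int × Int × String)) (i : Int) : List (Int × Int × String) :=
  let pi := PySem.List.pyGetD sp i ("", 0, false)
  if pi.2.2 || pk.2.2 then acc2 ++ [(pi.2.1, pk.2.1, cur)] else acc2

-- outer loop body over state (current_shingle, low_index, document_document_shingle)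
def stepA (sp : List (String × Int × Bool)) (st : String × Int × List (Int × Int × String))
    (k : Int) : String × Int × List (Int × Int × String) :=
  let pk := PySem.List.pyGetD sp k ("", 0, false)
  if pk.1 ≠ st.1 then (pk.1, k, st.2.2)
  else (st.1, st.2.1, (PySem.List.pyRange st.2.1 k 1).foldl (stepInnerA sp pk st.1) st.2.2)

def createDocumentDocumentList (shingle_pairs : List (String × Int × Bool)) : List (Int × Int × String) :=
  pvSortTriples
    (((PySem.List.pyRange 0 (shingle_pairs.length : Int) 1).foldl (stepA shingle_pairs)
      ("", -1, [])).2.2)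

-- ===== PORT B =====
-- loop body over state (current, run_docs, flagged_docs, out)
def stepB (st : Option String × List Int × List Int × List (Int × Int × String))
    (p : String × Int × Bool) : Option String × List Int × List Int × List (Int × Int × String) :=
  let residual :=
    if some p.1 ≠ st.1 then ((some p.1 : Option String), ([] : List Int), ([] : List Int), st.2.2.2)
    else (st.1, st.2.1, st.2.2.1,
      st.2.2.2 ++ (if p.2.2 then st.2.1 else st.2.2.1).map (fun q => (q, p.2.1, p.1)))
  (residual.1, residual.2.1 ++ [p.2.1],
   if p.2.2 then residual.2.2.1 ++ [p.2.1] else residual.2.2.1, residual.2.2.2)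

def createDocumentDocumentList_alt (shingle_pairs : List (String × Int × Bool)) : List (Int × Int × String) :=
  pvSortTriples ((shingle_pairs.foldl stepB (none, [], [], [])).2.2.2)

-- ===== PRECONDITION & SPEC =====
-- On inputs whose first shingle is "" (A's sentinel) and where the last element or some element of
-- the leading ""-run is flagged, A's low_index stays -1 and negative indexing pairs the leading run
-- against shingle_pairs[-1]; B treats the leading run as an ordinary run (the intended grouping).
def D_createDocumentDocumentList (shingle_pairs : List (String × Int × Bool)) : Prop :=
  shingle_pairs.head?.map (fun p => p.1) = some "" ∧
  ((shingle_pairs.getLast?.map (fun p => p.2.2) = some true) ∨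
   (shingle_pairs.takeWhile (fun p => p.1 == "")).any (fun p => p.2.2) = true)
instance (shingle_pairs : List (String × Int × Bool)) : Decidable (D_createDocumentDocumentList shingle_pairs) := by
  unfold D_createDocumentDocumentList; infer_instance

def Spec_createDocumentDocumentList (shingle_pairs : List (String × Int × Bool)) (out : List (Int × Int × String)) : Prop :=
  ¬ D_createDocumentDocumentList shingle_pairs → out = createDocumentDocumentList_alt shingle_pairs
instance (shingle_pairs : List (String × Int × Bool)) (out : List (Int × Int × String)) : Decidable (Spec_createDocumentDocumentList shingle_pairs out) := by
  unfold Spec_createDocumentDocumentList; infer_instance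

def pvDiffWitness_createDocumentDocumentList : (List (String × Int × Bool)) := [("", 5, true)]
def pvDiffWitnessOut_createDocumentDocumentList : (List (Int × Int × String)) × (List (Int × Int × String)) :=
  ([(5, 5, "")], [])

-- ===== CLAIM (what is proved, stated in full; the proofs are below) =====
def Claim_unchanged_createDocumentDocumentList : Prop := ∀ (shingle_pairs : List (String × Int × Bool)), Dom_createDocumentDocumentList shingle_pairs → Spec_createDocumentDocumentList shingle_pairs (createDocumentDocumentList shingle_pairs)
def Claim_changed_createDocumentDocumentList : Prop := Dom_createDocumentDocumentList (pvDiffWitness_createDocumentDocumentList) ∧ D_createDocumentDocumentList (pvDiffWitness_createDocumentDocumentList) ∧ createDocumentDocumentList (pvDiffWitness_createDocumentDocumentList) = pvDiffWitnessOut_createDocumentDocumentList.1 ∧ createDocumentDocumentList_alt (pvDiffWitness_createDocumentDocumentList) = pvDiffWitnessOut_createDocumentDocumentList.2 ∧ pvDiffWitnessOut_createDocumentDocumentList.1 ≠ pvDiffWitnessOut_createDocumentDocumentList.2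

-- ===== LEMMAS AND PROOFS =====

lemma pv_mem_takeWhile (done rest : List (String × Int × Bool))
    (hd : ∀ p ∈ done, p.1 = "") {x : String × Int × Bool} (hx : x ∈ done) :
    x ∈ (done ++ rest).takeWhile (fun p => p.1 == "") := by
  induction done with
  | nil => simp at hx
  | cons a t ih =>
    have ha : a.1 = "" := hd a (by simp)
    rw [List.cons_append, List.takeWhile_cons_of_pos (by simp [ha])]
    rcases List.mem_cons.mp hx with h | h
    · subst h; exact List.mem_cons_self
    · exact List.mem_cons_of_mem _ (ih (fun p hp => hd p (List.mem_cons_of_mem _ hp)) h)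


lemma pv_inner_fold : ∀ (run pre rest : List (String × Int × Bool)) (pk : String × Int × Bool)
    (cur : String) (acc : List (Int × Int × String)),
    (PySem.List.pyRange (pre.length : Int) ((pre.length + run.length : ℕ) : Int) 1).foldl
        (stepInnerA (pre ++ run ++ rest) pk cur) acc
      = acc ++ (run.filter (fun q => q.2.2 || pk.2.2)).map (fun q => (q.2.1, pk.2.1, cur)) := by
  intro run
  induction run with
  | nil =>
    intro pre rest pk cur acc
    rw [PySem.List.pyRange_one_eq_nil (by simp)]
    simp
  | cons q t ih =>
    intro pre rest pk cur acc
    have hlt : (pre.length : Int) < ((pre.length + (q :: t).length : ℕ) : Int) := by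
      simp only [List.length_cons]; push_cast; omega
    rw [PySem.List.pyRange_one_cons hlt]
    have hsp : pre ++ (q :: t) ++ rest = (pre ++ [q]) ++ t ++ rest := by simp
    have hget : PySem.List.pyGetD (pre ++ (q :: t) ++ rest) (pre.length : Int) ("", 0, false) = q := by
      rw [PySem.List.pyGetD_natCast]
      simp [List.getD]
    have hlen1 : ((pre.length : Int) + 1) = (((pre ++ [q]).length : ℕ) : Int) := by push_cast; simp
    have hlen2 : ((pre.length + (q :: t).length : ℕ) : Int) = (((pre ++ [q]).length + t.length : ℕ) : Int) := by
      simp only [List.length_cons, List.length_append, List.length_nil]; push_cast; omega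
    simp only [List.foldl_cons]
    rw [show stepInnerA (pre ++ (q :: t) ++ rest) pk cur acc (pre.length : Int)
        = if q.2.2 || pk.2.2 then acc ++ [(q.2.1, pk.2.1, cur)] else acc from by
          simp only [stepInnerA, hget]]
    rw [hlen1, hlen2, hsp, ih (pre ++ [q]) rest pk cur _]
    by_cases hq : (q.2.2 || pk.2.2) = true <;> simp [hq]


lemma pv_main_fold : ∀ (rest pre run : List (String × Int × Bool)) (cur : String)
    (acc : List (Int × Int × String)), (∀ p ∈ run, p.1 = cur) →
    ((PySem.List.pyRange ((pre.length + run.length : ℕ) : Int) (((pre ++ run ++ rest).length : ℕ) : Int) 1).foldl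
        (stepA (pre ++ run ++ rest)) (cur, (pre.length : Int), acc)).2.2
      = (rest.foldl stepB (some cur, run.map (fun q => q.2.1),
          (run.filter (fun q => q.2.2)).map (fun q => q.2.1), acc)).2.2.2 := by
  intro rest
  induction rest with
  | nil =>
    intro pre run cur acc _
    rw [PySem.List.pyRange_one_eq_nil (by simp)]
    simp
  | cons p t ih =>
    intro pre run cur acc hrun
    have hlt : ((pre.length + run.length : ℕ) : Int) < (((pre ++ run ++ p :: t).length : ℕ) : Int) := by
      simp only [List.length_append, List.length_cons]; push_cast; omega
    rw [PySem.List.pyRange_one_cons hlt]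
    have hget : PySem.List.pyGetD (pre ++ run ++ p :: t) ((pre.length + run.length : ℕ) : Int) ("", 0, false) = p := by
      rw [PySem.List.pyGetD_natCast, show pre.length + run.length = (pre ++ run).length from (List.length_append).symm]
      simp [List.getD]
    simp only [List.foldl_cons]
    by_cases hp : p.1 = cur
    · -- else branch of A: same shingle, emit run pairs
      have hstep : stepA (pre ++ run ++ p :: t) (cur, (pre.length : Int), acc) ((pre.length + run.length : ℕ) : Int)
          = (cur, (pre.length : Int),
             acc ++ (run.filter (fun q => q.2.2 || p.2.2)).map (fun q => (q.2.1, p.2.1, cur))) := by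
        simp only [stepA, hget, hp]
        rw [if_neg (by simp)]
        rw [pv_inner_fold run pre (p :: t) p cur acc]
      rw [hstep]
      have hlen1 : (((pre.length + run.length : ℕ) : Int) + 1) = ((pre.length + (run ++ [p]).length : ℕ) : Int) := by
        simp only [List.length_append, List.length_cons, List.length_nil]; push_cast; omega
      have hsp : pre ++ run ++ p :: t = pre ++ (run ++ [p]) ++ t := by simp
      rw [hlen1, hsp, ih pre (run ++ [p]) cur _ (by
        intro q hq; rcases List.mem_append.mp hq with h | h
        · exact hrun q h
        · simp at h; subst h; exact hp)]
      -- now match B's step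
      have hB : stepB (some cur, run.map (fun q => q.2.1),
            (run.filter (fun q => q.2.2)).map (fun q => q.2.1), acc) p
          = (some cur, (run ++ [p]).map (fun q => q.2.1),
             ((run ++ [p]).filter (fun q => q.2.2)).map (fun q => q.2.1),
             acc ++ (run.filter (fun q => q.2.2 || p.2.2)).map (fun q => (q.2.1, p.2.1, cur))) := by
        simp only [stepB, hp]
        rw [if_neg (by simp)]
        by_cases hf : p.2.2 = true <;>
          simp [hf, List.filter_append, List.map_map, Function.comp]
      rw [hB]
    · -- if branch of A: new run
      have hstep : stepA (pre ++ run ++ p :: t) (cur, (pre.length : Int), acc) ((pre.length + run.length : ℕ) : Int)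
          = (p.1, ((pre.length + run.length : ℕ) : Int), acc) := by
        simp only [stepA, hget]
        rw [if_pos (by simpa using hp)]
      rw [hstep]
      have hlen1 : (((pre.length + run.length : ℕ) : Int) + 1) = (((pre ++ run).length + ([p] : List (String × Int × Bool)).length : ℕ) : Int) := by
        simp only [List.length_append, List.length_cons, List.length_nil]; push_cast; omega
      have hlow : ((pre.length + run.length : ℕ) : Int) = (((pre ++ run).length : ℕ) : Int) := by
        simp
      have hsp : pre ++ run ++ p :: t = (pre ++ run) ++ [p] ++ t := by simp
      rw [hlen1, hlow, hsp, ih (pre ++ run) [p] p.1 acc (by intro q hq; simp at hq; subst hq; rfl)]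
      have hB : stepB (some cur, run.map (fun q => q.2.1),
            (run.filter (fun q => q.2.2)).map (fun q => q.2.1), acc) p
          = (some p.1, ([p] : List (String × Int × Bool)).map (fun q => q.2.1),
             (([p] : List (String × Int × Bool)).filter (fun q => q.2.2)).map (fun q => q.2.1), acc) := by
        simp only [stepB]
        rw [if_pos (by simp [hp])]
        by_cases hf : p.2.2 = true <;> simp [hf]
      rw [hB]


lemma pv_lead_fold (sp : List (String × Int × Bool))
    (hlast : (PySem.List.pyGetD sp (-1) ("", 0, false)).2.2 = false)
    (hflags : ∀ p ∈ sp.takeWhile (fun q => q.1 == ""), p.2.2 = false) :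
    ∀ (rest done : List (String × Int × Bool)) (acc : List (Int × Int × String)),
      sp = done ++ rest → done ≠ [] → (∀ p ∈ done, p.1 = "") →
      ((PySem.List.pyRange ((done.length : ℕ) : Int) ((sp.length : ℕ) : Int) 1).foldl
          (stepA sp) ("", -1, acc)).2.2
        = (rest.foldl stepB (some "", done.map (fun q => q.2.1), [], acc)).2.2.2 := by
  intro rest
  induction rest with
  | nil =>
    intro done acc hsp hne hd
    subst hsp
    rw [PySem.List.pyRange_one_eq_nil (by simp)]
    simp
  | cons p t ih =>
    intro done acc hsp hne hd
    have hdlen : 0 < done.length := List.length_pos_iff.mpr hne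
    have hlt : ((done.length : ℕ) : Int) < ((sp.length : ℕ) : Int) := by
      subst hsp; simp only [List.length_append, List.length_cons]; push_cast; omega
    rw [PySem.List.pyRange_one_cons hlt]
    have hget : PySem.List.pyGetD sp ((done.length : ℕ) : Int) ("", 0, false) = p := by
      subst hsp; rw [PySem.List.pyGetD_natCast]; simp [List.getD]
    simp only [List.foldl_cons]
    by_cases hp : p.1 = ""
    · -- still inside the leading ""-run: no emission on either side
      have hpf : p.2.2 = false := by
        apply hflags
        have hmem := pv_mem_takeWhile (done ++ [p]) t
          (by intro q hq; rcases List.mem_append.mp hq with h | h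
              · exact hd q h
              · simp at h; subst h; exact hp) (x := p) (by simp)
        have : (done ++ [p]) ++ t = sp := by simp [hsp]
        rwa [this] at hmem
      have hdf : ∀ q ∈ done, q.2.2 = false := by
        intro q hq
        apply hflags
        have hmem := pv_mem_takeWhile done (p :: t) hd hq
        rwa [← hsp] at hmem
      have hstep : stepA sp ("", -1, acc) ((done.length : ℕ) : Int) = ("", -1, acc) := by
        simp only [stepA, hget]
        rw [if_neg (by simp [hp])]
        have h1 : PySem.List.pyRange (-1) ((done.length : ℕ) : Int) 1
            = -1 :: PySem.List.pyRange 0 ((done.length : ℕ) : Int) 1 := by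
          rw [PySem.List.pyRange_one_cons (by push_cast; omega)]
          norm_num
        rw [h1]
        simp only [List.foldl_cons]
        have h2 : stepInnerA sp p "" acc (-1) = acc := by
          simp only [stepInnerA, hlast, hpf]
          simp
        rw [h2]
        have h3 : (PySem.List.pyRange 0 ((done.length : ℕ) : Int) 1).foldl (stepInnerA sp p "") acc = acc := by
          have h4 := pv_inner_fold done [] (p :: t) p "" acc
          simp only [List.length_nil, List.nil_append, Nat.cast_zero, Nat.zero_add, zero_add] at h4
          rw [← hsp] at h4
          rw [h4]
          have h5 : done.filter (fun q => q.2.2 || p.2.2) = [] := by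
            apply List.filter_eq_nil_iff.mpr
            intro q hq; simp [hdf q hq, hpf]
          rw [h5]; simp
        rw [h3]
      rw [hstep]
      have hlen1 : (((done.length : ℕ) : Int) + 1) = (((done ++ [p]).length : ℕ) : Int) := by
        simp only [List.length_append, List.length_cons, List.length_nil]; push_cast; omega
      rw [hlen1, ih (done ++ [p]) acc (by simp [hsp])
        (by simp)
        (by intro q hq; rcases List.mem_append.mp hq with h | h
            · exact hd q h
            · simp at h; subst h; exact hp)]
      have hB : stepB (some "", done.map (fun q => q.2.1), [], acc) p
          = (some "", (done ++ [p]).map (fun q => q.2.1), [], acc) := by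
        simp only [stepB]
        rw [if_neg (by simp [hp])]
        simp [hpf]
      rw [hB]
    · -- the leading run ends here: hand over to the main invariant
      have hstep : stepA sp ("", -1, acc) ((done.length : ℕ) : Int)
          = (p.1, ((done.length : ℕ) : Int), acc) := by
        simp only [stepA, hget]
        rw [if_pos (by simpa using hp)]
      rw [hstep]
      have hlen1 : (((done.length : ℕ) : Int) + 1)
          = ((done.length + ([p] : List (String × Int × Bool)).length : ℕ) : Int) := by
        simp only [List.length_cons, List.length_nil]; push_cast; omega
      have hsp2 : sp = done ++ [p] ++ t := by simp [hsp]
      rw [hlen1]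
      rw [show ((sp.length : ℕ) : Int) = (((done ++ [p] ++ t).length : ℕ) : Int) from by rw [← hsp2]]
      rw [show stepA sp = stepA (done ++ [p] ++ t) from by rw [← hsp2]]
      rw [pv_main_fold t done [p] p.1 acc (by intro q hq; simp at hq; subst hq; rfl)]
      have hB : stepB (some "", done.map (fun q => q.2.1), [], acc) p
          = (some p.1, ([p] : List (String × Int × Bool)).map (fun q => q.2.1),
             (([p] : List (String × Int × Bool)).filter (fun q => q.2.2)).map (fun q => q.2.1), acc) := by
        simp only [stepB]
        rw [if_pos (by simp [hp])]
        by_cases hf : p.2.2 = true <;> simp [hf]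
      rw [hB]


theorem pv_top (sp : List (String × Int × Bool)) (hnD : ¬ D_createDocumentDocumentList sp) :
    createDocumentDocumentList sp = createDocumentDocumentList_alt sp := by
  unfold createDocumentDocumentList createDocumentDocumentList_alt
  congr 1
  cases sp with
  | nil =>
    rw [PySem.List.pyRange_one_eq_nil (by simp)]
    simp
  | cons p tl =>
    have hlt0 : (0 : Int) < (((p :: tl).length : ℕ) : Int) := by
      simp only [List.length_cons]; push_cast; omega
    rw [PySem.List.pyRange_one_cons hlt0]
    simp only [List.foldl_cons]
    by_cases hp : p.1 = ""
    · -- leading ""-run; ¬D_ gives: last not flagged, no flag in the leading run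
      have hhead : (p :: tl).head?.map (fun q => q.1) = some "" := by simp [hp]
      rw [D_createDocumentDocumentList, not_and_or] at hnD
      rcases hnD with h | h
      · exact absurd hhead h
      rw [not_or] at h
      obtain ⟨hlastne, hany⟩ := h
      have hne : (p :: tl) ≠ [] := by simp
      have hlast : (PySem.List.pyGetD (p :: tl) (-1) ("", 0, false)).2.2 = false := by
        rw [PySem.List.pyGetD_neg_one _ _ hne]
        have hq : (p :: tl).getLast? = some ((p :: tl).getLast hne) := by
          rw [List.getLast?_eq_getLast]
        by_contra hcon
        apply hlastne
        rw [hq]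
        simp at hcon
        simp [hcon]
      have hflags : ∀ q ∈ (p :: tl).takeWhile (fun q => q.1 == ""), q.2.2 = false := by
        intro q hq
        by_contra hcon
        apply hany
        rw [List.any_eq_true]
        exact ⟨q, hq, by simpa using hcon⟩
      have hpf : p.2.2 = false := by
        apply hflags
        rw [List.takeWhile_cons_of_pos (by simp [hp])]
        exact List.mem_cons_self
      have hstep : stepA (p :: tl) ("", -1, []) 0 = ("", -1, []) := by
        simp only [stepA, PySem.List.pyGetD_zero_cons]
        rw [if_neg (by simp [hp])]
        rw [show PySem.List.pyRange (-1) 0 1 = [-1] from by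
          rw [PySem.List.pyRange_one_cons (by omega), show (-1 : Int) + 1 = 0 from by norm_num,
            PySem.List.pyRange_one_eq_nil (le_refl 0)]]
        simp only [List.foldl_cons, List.foldl_nil]
        simp only [stepInnerA, hlast, hpf]
        simp
      rw [hstep]
      have hl := pv_lead_fold (p :: tl) hlast hflags tl [p] []
        (by simp) (by simp) (by intro q hq; simp at hq; subst hq; exact hp)
      rw [show (0 : Int) + 1 = ((([p] : List (String × Int × Bool)).length : ℕ) : Int) from by simp] at *
      rw [hl]
      have hB : stepB (none, [], [], []) p
          = (some p.1, [p.2.1], if p.2.2 then [p.2.1] else [], []) := by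
        simp only [stepB]
        rw [if_pos (by simp)]
        by_cases hf : p.2.2 = true <;> simp [hf]
      rw [hB, hpf, hp]
      simp
    · -- ordinary first element: main invariant from the start
      have hstep : stepA (p :: tl) ("", -1, []) 0 = (p.1, 0, []) := by
        simp only [stepA, PySem.List.pyGetD_zero_cons]
        rw [if_pos (by simpa using hp)]
      rw [hstep]
      have hm := pv_main_fold tl [] [p] p.1 []
        (by intro q hq; simp at hq; subst hq; rfl)
      simp only [List.length_nil, List.length_cons, List.length_singleton, List.nil_append,
        Nat.zero_add, Nat.cast_one, Nat.cast_zero] at hm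
      simp only [List.singleton_append] at hm
      rw [show (0 : Int) + 1 = (1 : Int) from by norm_num]
      rw [hm]
      have hB : stepB (none, [], [], []) p
          = (some p.1, [p.2.1], if p.2.2 then [p.2.1] else [], []) := by
        simp only [stepB]
        rw [if_pos (by simp)]
        by_cases hf : p.2.2 = true <;> simp [hf]
      rw [hB]
      by_cases hf : p.2.2 = true <;> simp [hf]


-- ===== VERDICT (by name: the statement is the Claim_ definition above) =====
theorem createDocumentDocumentList_spec : Claim_unchanged_createDocumentDocumentList := by
  intro sp _ hnD
  exact pv_top sp hnD

theorem createDocumentDocumentList_changed : Claim_changed_createDocumentDocumentList := by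
  unfold Claim_changed_createDocumentDocumentList; decide
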